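-- pv_equiv track=rewrite | github.com/pypi-data/pypi-mirror-370 | packages/lexer-fdfattor-2025/lexer_fdfattor_2025-1.0.1.tar.gz/lexer_fdfattor_2025-1.0.1/lexer/core.py | afd_id
-- ===== SOURCE A (Python) =====
-- ESTADO_FINAL = "ESTADO FINAL"
--
-- ESTADO_NO_FINAL = "NO ACEPTADO"
--
-- ESTADO_TRAMPA = "EN ESTADO TRAMPA"
--
-- def afd_id(lexema):
--     estado = 0
--     estados_finales = [1]
--     for c in lexema:
--         if estado == 0 and c.isalpha():
--             estado = 1
--         elif estado == 1 and c.isalnum():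
--             estado = 1
--         else:
--             estado = -1
--
--     if estado == -1:
--         return ESTADO_TRAMPA
--     if estado in estados_finales:
--         return ESTADO_FINAL
--     else:
--         return ESTADO_NO_FINAL
-- ===== SOURCE B (Python) =====
-- def afd_id(lexema):
--     if not lexema:
--         return "NO ACEPTADO"
--     if lexema[0].isalpha() and all(c.isalnum() for c in lexema[1:]):
--         return "ESTADO FINAL"
--     return "EN ESTADO TRAMPA"
-- ===== Notes on version B (the rewrite author's own statement) =====
-- stated objective: simpler
-- what changed: Replaces the explicit DFA state loop with a direct acceptance test: first char isalpha and the rest isalnum, with the empty string handled up front.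
import Mathlib
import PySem

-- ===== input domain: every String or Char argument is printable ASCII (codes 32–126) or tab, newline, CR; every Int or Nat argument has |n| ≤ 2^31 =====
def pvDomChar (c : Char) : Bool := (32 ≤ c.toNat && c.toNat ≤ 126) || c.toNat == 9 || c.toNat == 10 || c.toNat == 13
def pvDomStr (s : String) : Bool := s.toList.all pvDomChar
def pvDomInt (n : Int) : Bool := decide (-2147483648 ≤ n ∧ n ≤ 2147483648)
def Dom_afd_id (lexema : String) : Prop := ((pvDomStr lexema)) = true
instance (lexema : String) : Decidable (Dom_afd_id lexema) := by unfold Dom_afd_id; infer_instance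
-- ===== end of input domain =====

-- B replaces the explicit DFA state loop with a direct acceptance test (simpler).


-- ===== PORT A =====
def afdStep (estado : Int) (c : Char) : Int :=
  if estado == 0 && PySem.Chars.isalpha c then 1
  else if estado == 1 && PySem.Chars.isalnum c then 1
  else -1

def afd_id (lexema : String) : String :=
  let estados_finales : List Int := [1]
  let estado := lexema.toList.foldl afdStep 0
  if estado == -1 then "EN ESTADO TRAMPA"
  else if estados_finales.contains estado then "ESTADO FINAL"
  else "NO ACEPTADO"

-- ===== PORT B =====
def afd_id_alt (lexema : String) : String :=
  if lexema.toList = [] then "NO ACEPTADO"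
  else if ((PySem.List.pyGet? lexema.toList 0).getD ' ' |> PySem.Chars.isalpha)
          && (PySem.List.slice lexema.toList (some 1) none).all PySem.Chars.isalnum
  then "ESTADO FINAL"
  else "EN ESTADO TRAMPA"

-- ===== PRECONDITION & SPEC =====
def Spec_afd_id (lexema : String) (out : String) : Prop := out = afd_id_alt lexema
instance (lexema : String) (out : String) : Decidable (Spec_afd_id lexema out) := by unfold Spec_afd_id; infer_instance

-- ===== CLAIM (what is proved, stated in full; the proofs are below) =====
def Claim_equal_afd_id : Prop := ∀ (lexema : String), Dom_afd_id lexema → Spec_afd_id lexema (afd_id lexema)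

-- ===== LEMMAS AND PROOFS =====
theorem afdStep_trap (l : List Char) : l.foldl afdStep (-1) = -1 := by
  induction l with
  | nil => rfl
  | cons c rest ih => simpa [afdStep] using ih

theorem afdStep_one (l : List Char) :
    l.foldl afdStep 1 = if l.all PySem.Chars.isalnum then 1 else -1 := by
  induction l with
  | nil => rfl
  | cons c rest ih =>
    by_cases h : PySem.Chars.isalnum c = true
    · simp [afdStep, h, ih]
    · simp [afdStep, h, afdStep_trap]

-- ===== VERDICT (by name: the statement is the Claim_ definition above) =====
theorem afd_id_spec : Claim_equal_afd_id := by
  intro lexema _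
  unfold Spec_afd_id afd_id afd_id_alt
  cases hl : lexema.toList with
  | nil => rfl
  | cons c rest =>
    by_cases ha : PySem.Chars.isalpha c = true
    · simp [afdStep, ha, afdStep_one, PySem.List.pyGet?, PySem.List.pyIdx?,
        PySem.List.slice]
      by_cases hn : rest.all PySem.Chars.isalnum
      all_goals simp_all
    · simp [afdStep, ha, afdStep_trap, PySem.List.pyGet?, PySem.List.pyIdx?,
        PySem.List.slice]
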